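-- pv_equiv track=rewrite | github.com/aschotte/Cryptide | CyptideGUI.py | impossible_clues
-- ===== SOURCE A (Python) =====
-- def impossible_clues(cube_percol, circle_percol, ens):
--     dico={}
--     #loop on cubes
--     for color, elt_list in cube_percol.items():
--         for elt in elt_list:
--             for clue,ensemble in ens.items():
--                 if elt in ensemble:
--                     if color in dico:
--                         if clue not in dico[color]:
--                             dico[color].append(clue)
--                             dico[color].sort()
--                     else:
--                         dico[color]=[clue]
--     #loop on circles
--     for color, elt_list in circle_percol.items():
--         for elt in elt_list:
--             for clue,ensemble in ens.items():
--                 if elt not in ensemble: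
--                     if color in dico:
--                         if clue not in dico[color]:
--                             dico[color].append(clue)
--                             dico[color].sort()
--                     else:
--                         dico[color]=[clue]
--     return dico
-- ===== SOURCE B (Python) =====
-- def impossible_clues(cube_percol, circle_percol, ens):
--     # Invert ens once: element -> set of clues whose ensemble contains it.
--     index = {}
--     for clue, ensemble in ens.items():
--         for e in ensemble:
--             index.setdefault(e, set()).add(clue)
--     all_clues = set(ens)
--     out = {}
--     for color, elt_list in cube_percol.items():
--         hit = set()
--         for e in elt_list:
--             hit |= index.get(e, set())
--         if hit:
--             out[color] = hit
--     for color, elt_list in circle_percol.items():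
--         miss = set()
--         for e in elt_list:
--             miss |= all_clues - index.get(e, set())
--         if miss:
--             out[color] = out.get(color, set()) | miss
--     return {color: sorted(s) for color, s in out.items()}
-- ===== Notes on version B (the rewrite author's own statement) =====
-- stated objective: faster
-- what changed: A's triple nested loop (per color, per element, per clue, with a list-membership test and an append-and-resort per insertion) is replaced by a one-time inverted index from element to the set of clues containing it; each percolation element then costs one index lookup (set union for cubes, complement union for circles), the clue loop disappears, and each color's set is sorted once at the end.
import Mathlib
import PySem

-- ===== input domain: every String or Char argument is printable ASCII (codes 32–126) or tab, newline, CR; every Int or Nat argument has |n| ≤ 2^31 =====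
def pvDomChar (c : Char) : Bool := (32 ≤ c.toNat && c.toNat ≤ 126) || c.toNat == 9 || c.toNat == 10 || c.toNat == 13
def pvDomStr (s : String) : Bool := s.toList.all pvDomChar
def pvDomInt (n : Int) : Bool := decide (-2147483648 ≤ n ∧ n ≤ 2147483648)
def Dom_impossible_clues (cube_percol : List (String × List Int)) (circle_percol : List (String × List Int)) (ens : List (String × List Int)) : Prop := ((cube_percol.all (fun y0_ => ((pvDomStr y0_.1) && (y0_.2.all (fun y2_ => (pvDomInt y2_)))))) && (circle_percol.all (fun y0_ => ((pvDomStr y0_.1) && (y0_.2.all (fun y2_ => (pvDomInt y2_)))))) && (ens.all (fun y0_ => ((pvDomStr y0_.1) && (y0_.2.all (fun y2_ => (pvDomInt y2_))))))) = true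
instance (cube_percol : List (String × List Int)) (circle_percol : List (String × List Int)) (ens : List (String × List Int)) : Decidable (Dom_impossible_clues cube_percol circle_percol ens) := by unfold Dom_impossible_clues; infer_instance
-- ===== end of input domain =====

-- B inverts ens once into an element→clues index, then handles each percolation element with one
-- index lookup (set union / complement union) instead of A's inner loop over all clues,
-- sorting each color's clue set once at the end.

-- ===== PORT A =====
-- dico[color]: 'if clue not in dico[color]: append; sort' / 'dico[color] = [clue]'
def pvAddClue (d : PySem.Dict String (List String)) (color clue : String) :
    PySem.Dict String (List String) :=
  match d.get? color with
  | some l => if clue ∈ l then d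
              else d.insert color (PySem.List.sorted (l ++ [clue]) (fun x => x) false)
  | none => d.insert color [clue]

-- one of A's two copy-pasted passes; 'cond elt ensemble' is 'elt in ensemble' (cubes)
-- resp. 'elt not in ensemble' (circles)
def pvPassA (cond : Int → List Int → Bool) (ens : List (String × List Int))
    (d0 : PySem.Dict String (List String)) (percol : List (String × List Int)) :
    PySem.Dict String (List String) :=
  percol.foldl (fun d ce =>
    ce.2.foldl (fun d elt =>
      ens.foldl (fun d ke => if cond elt ke.2 then pvAddClue d ce.1 ke.1 else d) d) d) d0

def impossible_clues (cube_percol : List (String × List Int))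
    (circle_percol : List (String × List Int)) (ens : List (String × List Int)) :
    List (String × List String) :=
  (pvPassA (fun elt ensemble => !(ensemble.contains elt)) ens
    (pvPassA (fun elt ensemble => ensemble.contains elt) ens PySem.Dict.empty cube_percol)
    circle_percol).items

-- ===== PORT B =====
-- 'for clue, ensemble in ens.items(): for e in ensemble: index.setdefault(e, set()).add(clue)'
def pvIndex (ens : List (String × List Int)) : PySem.Dict Int (PySem.Set String) :=
  ens.foldl (fun d ke =>
    ke.2.foldl (fun d e => d.insert e (PySem.Set.add (d.getD e []) ke.1)) d) PySem.Dict.empty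

-- 'hit = set(); for e in elt_list: hit |= index.get(e, set())'
def pvHit (idx : PySem.Dict Int (PySem.Set String)) (elt_list : List Int) : PySem.Set String :=
  elt_list.foldl (fun s e => PySem.Set.union s (idx.getD e [])) PySem.Set.empty

-- 'miss = set(); for e in elt_list: miss |= all_clues - index.get(e, set())'
def pvMiss (idx : PySem.Dict Int (PySem.Set String)) (all_clues : PySem.Set String)
    (elt_list : List Int) : PySem.Set String :=
  elt_list.foldl (fun s e => PySem.Set.union s (PySem.Set.diff all_clues (idx.getD e [])))
    PySem.Set.empty

def impossible_clues_alt (cube_percol : List (String × List Int))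
    (circle_percol : List (String × List Int)) (ens : List (String × List Int)) :
    List (String × List String) :=
  let idx := pvIndex ens
  let all_clues : PySem.Set String := PySem.Set.ofList (ens.map Prod.fst)
  let acc1 := cube_percol.foldl (fun out ce =>
    let s := pvHit idx ce.2
    if s ≠ [] then out.insert ce.1 s else out) PySem.Dict.empty
  let acc2 := circle_percol.foldl (fun out ce =>
    let s := pvMiss idx all_clues ce.2
    if s ≠ [] then out.insert ce.1 (PySem.Set.union (out.getD ce.1 []) s) else out) acc1
  acc2.items.map (fun p => (p.1, PySem.List.sorted p.2 (fun x => x) false))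

-- ===== PRECONDITION & SPEC =====
-- The Python arguments are dicts, whose keys are necessarily distinct; an association list with a
-- duplicated key represents no Python input, so Pre_ requires the keys of each argument to be distinct.
def Pre_impossible_clues (cube_percol : List (String × List Int))
    (circle_percol : List (String × List Int)) (ens : List (String × List Int)) : Prop :=
  (cube_percol.map Prod.fst).Nodup ∧ (circle_percol.map Prod.fst).Nodup ∧ (ens.map Prod.fst).Nodup
instance (cube_percol : List (String × List Int)) (circle_percol : List (String × List Int)) (ens : List (String × List Int)) : Decidable (Pre_impossible_clues cube_percol circle_percol ens) := by unfold Pre_impossible_clues; infer_instance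

def pvWitness_impossible_clues : (List (String × List Int)) × (List (String × List Int)) × (List (String × List Int)) :=
  ([("red", [1, 2])], [("blue", [3])], [("c1", [1]), ("c2", [3, 5])])

def Spec_impossible_clues (cube_percol : List (String × List Int)) (circle_percol : List (String × List Int)) (ens : List (String × List Int)) (out : List (String × List String)) : Prop := out = impossible_clues_alt cube_percol circle_percol ens
instance (cube_percol : List (String × List Int)) (circle_percol : List (String × List Int)) (ens : List (String × List Int)) (out : List (String × List String)) : Decidable (Spec_impossible_clues cube_percol circle_percol ens out) := by unfold Spec_impossible_clues; infer_instance

-- ===== CLAIM (what is proved, stated in full; the proofs are below) =====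
def Claim_equal_impossible_clues : Prop := ∀ (cube_percol : List (String × List Int)) (circle_percol : List (String × List Int)) (ens : List (String × List Int)), Dom_impossible_clues cube_percol circle_percol ens → Pre_impossible_clues cube_percol circle_percol ens → Spec_impossible_clues cube_percol circle_percol ens (impossible_clues cube_percol circle_percol ens)

-- ===== LEMMAS AND PROOFS =====

-- proof-side abbreviations
def pvSortS (l : List String) : List String := PySem.List.sorted l (fun x => x) false
def pvMapSort (l : List (String × List String)) : List (String × List String) :=
  l.map (fun p => (p.1, pvSortS p.2))
-- invariant linking A's dict to B's dict: same keys in the same order, A's values the sorted B sets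
def pvInv (dA dB : PySem.Dict String (List String)) : Prop :=
  dB.keys.Nodup ∧ (∀ p ∈ dB.items, (p.2 : List String).Nodup) ∧ dA.items = pvMapSort dB.items

lemma pvSorted_lt (xs : List String) (h : xs.Nodup) : (pvSortS xs).Pairwise (· < ·) := by
  unfold pvSortS
  have hp := PySem.List.sorted_pairwise xs (fun x => x)
  have hn : (PySem.List.sorted xs (fun x => x) false).Nodup :=
    (List.Perm.nodup_iff (PySem.List.sorted_perm xs (fun x => x) false)).mpr h
  exact (hp.and hn).imp (fun hab => lt_of_le_of_ne hab.1 hab.2)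

lemma pvSortS_eq (xs ys : List String) (hx : xs.Nodup) (hy : ys.Nodup)
    (hext : ∀ a, a ∈ xs ↔ a ∈ ys) : pvSortS xs = pvSortS ys := by
  unfold pvSortS
  exact PySem.List.sorted_eq_sorted_of_perm xs ys (fun x => x) (fun a b hab => hab)
    ((List.perm_ext_iff_of_nodup hx hy).mpr hext)

lemma pvGet?_mapSort (l : List (String × List String)) (k : String) :
    (PySem.Dict.mk (pvMapSort l)).get? k = ((PySem.Dict.mk l).get? k).map pvSortS := by
  induction l with
  | nil => rfl
  | cons p rest ih =>
    simp only [pvMapSort, List.map_cons] at *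
    rw [PySem.Dict.get?_mk_cons, PySem.Dict.get?_mk_cons]
    by_cases hk : p.1 == k
    · simp [hk]
    · simp only [hk, Bool.false_eq_true, ite_false]
      exact ih

lemma pvInv_get? {dA dB : PySem.Dict String (List String)} (h : pvInv dA dB) (k : String) :
    dA.get? k = (dB.get? k).map pvSortS := by
  obtain ⟨-, -, hitems⟩ := h
  have h1 : dA = PySem.Dict.mk (pvMapSort dB.items) := PySem.Dict.ext hitems
  have h2 : PySem.Dict.mk dB.items = dB := PySem.Dict.ext rfl
  rw [h1, pvGet?_mapSort, h2]

lemma pvInv_keysA {dA dB : PySem.Dict String (List String)} (h : pvInv dA dB) :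
    dA.keys.Nodup := by
  obtain ⟨hk, -, hitems⟩ := h
  have hkeys : dA.keys = dB.keys := by
    simp only [PySem.Dict.keys, hitems, pvMapSort, List.map_map]
    rfl
  rw [hkeys]
  exact hk

lemma pvInsert_self (d : PySem.Dict String (List String)) (k : String) (v : List String)
    (hk : d.keys.Nodup) (h : d.get? k = some v) : d.insert k v = d := by
  have hc : d.contains k = true := by rw [PySem.Dict.contains_eq_isSome_get?, h]; rfl
  apply PySem.Dict.ext
  rw [PySem.Dict.items_insert_of_contains d v hc]
  conv_rhs => rw [← List.map_id d.items]
  apply List.map_congr_left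
  intro p hp
  by_cases hpk : p.1 = k
  · have hgp : d.get? p.1 = some p.2 := PySem.Dict.get?_of_mem_items d (by simpa using hp) hk
    rw [hpk, h] at hgp
    have hv : p.2 = v := by injection hgp.symm
    simp only [hpk, beq_self_eq_true, if_true, id_eq]
    exact Prod.ext hpk.symm hv.symm
  · simp [hpk]

lemma pvFoldAdd_some (color : String) : ∀ (L : List String) (d : PySem.Dict String (List String))
    (v : List String), d.keys.Nodup → d.get? color = some v → v.Pairwise (· < ·) →
    L.foldl (fun d c => pvAddClue d color c) d
      = d.insert color (pvSortS (PySem.Set.update v L)) := by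
  intro L
  induction L with
  | nil =>
    intro d v hk h hp
    simp only [List.foldl_nil]
    have hupd : PySem.Set.update v ([] : List String) = v := rfl
    rw [hupd]
    unfold pvSortS
    rw [PySem.List.sorted_eq_self_of_pairwise v (fun x => x) (hp.imp le_of_lt)]
    exact (pvInsert_self d color v hk h).symm
  | cons c L ih =>
    intro d v hk h hp
    rw [List.foldl_cons]
    by_cases hc : c ∈ v
    · have hstep : pvAddClue d color c = d := by
        simp only [pvAddClue, h]
        rw [if_pos hc]
      rw [hstep, ih d v hk h hp]
      have hupd : PySem.Set.update v (c :: L) = PySem.Set.update v L := by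
        show List.foldl PySem.Set.add v (c :: L) = List.foldl PySem.Set.add v L
        rw [List.foldl_cons]
        have hadd : PySem.Set.add v c = v := by
          have hct : PySem.Set.contains v c = true := (PySem.Set.contains_iff v c).mpr hc
          simp only [PySem.Set.add, hct]
          rfl
        rw [hadd]
      rw [hupd]
    · have hstep : pvAddClue d color c = d.insert color (pvSortS (v ++ [c])) := by
        simp only [pvAddClue, h, pvSortS]
        rw [if_neg hc]
      rw [hstep]
      have hvnd : v.Nodup := hp.imp (fun hab => ne_of_lt hab)
      have hnd : (v ++ [c]).Nodup := by
        refine List.Nodup.append hvnd (List.nodup_singleton c) ?_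
        intro a ha hmem
        rw [List.mem_singleton] at hmem
        exact hc (hmem ▸ ha)
      have hsnd : (pvSortS (v ++ [c])).Nodup := by
        unfold pvSortS
        exact (List.Perm.nodup_iff (PySem.List.sorted_perm _ (fun x => x) false)).mpr hnd
      rw [ih _ _ (PySem.Dict.nodup_keys_insert d color _ hk)
        (PySem.Dict.get?_insert_self d color _) (pvSorted_lt _ hnd)]
      rw [PySem.Dict.insert_insert_self]
      congr 1
      apply pvSortS_eq
      · exact PySem.Set.nodup_update _ L hsnd
      · exact PySem.Set.nodup_update _ (c :: L) hvnd
      · intro a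
        have hupd : PySem.Set.update v (c :: L) = PySem.Set.update (v ++ [c]) L := by
          show List.foldl PySem.Set.add v (c :: L) = List.foldl PySem.Set.add (v ++ [c]) L
          rw [List.foldl_cons]
          have hadd : PySem.Set.add v c = v ++ [c] := by
            simp only [PySem.Set.add]
            rw [if_neg]
            simp only [PySem.Set.contains_eq_listContains]
            simp [hc]
          rw [hadd]
        rw [hupd]
        rw [PySem.Set.mem_update, PySem.Set.mem_update]
        unfold pvSortS
        rw [PySem.List.mem_sorted]

lemma pvFoldAdd_none (color : String) (L : List String) (d : PySem.Dict String (List String))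
    (hk : d.keys.Nodup) (h : d.get? color = none) :
    L.foldl (fun d c => pvAddClue d color c) d
      = if L = [] then d else d.insert color (pvSortS (PySem.Set.ofList L)) := by
  cases L with
  | nil => simp
  | cons c L =>
    rw [if_neg (by simp)]
    rw [List.foldl_cons]
    have hstep : pvAddClue d color c = d.insert color [c] := by simp [pvAddClue, h]
    rw [hstep]
    rw [pvFoldAdd_some color L _ [c] (PySem.Dict.nodup_keys_insert d color _ hk)
      (PySem.Dict.get?_insert_self d color _) (List.pairwise_singleton _ _)]
    rw [PySem.Dict.insert_insert_self]
    have hl : PySem.Set.update [c] L = PySem.Set.ofList (c :: L) := by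
      rw [PySem.Set.ofList_eq_foldl, List.foldl_cons]
      rfl
    rw [hl]

-- A's two inner loops over one color, as a single clue fold
lemma pvPassA_inner (cond : Int → List Int → Bool) (ens : List (String × List Int))
    (color : String) : ∀ (el : List Int) (d : PySem.Dict String (List String)),
    el.foldl (fun d elt =>
      ens.foldl (fun d ke => if cond elt ke.2 then pvAddClue d color ke.1 else d) d) d
    = (el.flatMap (fun elt => (ens.filter (fun ke => cond elt ke.2)).map Prod.fst)).foldl
        (fun d c => pvAddClue d color c) d := by
  intro el
  induction el with
  | nil => intro d; rfl
  | cons e el ih =>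
    intro d
    rw [List.foldl_cons, List.flatMap_cons, List.foldl_append, ih]
    congr 1
    rw [List.foldl_map, List.foldl_filter]

-- the index builder's inner loop over one ensemble, characterised by membership
lemma pvIndexInner (clue : String) : ∀ (ensemble : List Int)
    (d : PySem.Dict Int (PySem.Set String)) (e : Int) (x : String),
    x ∈ (ensemble.foldl (fun d e' => d.insert e' (PySem.Set.add (d.getD e' []) clue)) d).getD e []
      ↔ x ∈ d.getD e [] ∨ (x = clue ∧ e ∈ ensemble) := by
  intro ensemble
  induction ensemble with
  | nil => intro d e x; simp
  | cons e' rest ih =>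
    intro d e x
    rw [List.foldl_cons, ih, PySem.Dict.getD_insert]
    by_cases he : e = e'
    · subst he
      rw [if_pos (rfl : e = e)]
      simp only [PySem.Set.mem_add, List.mem_cons]
      tauto
    · simp only [if_neg he, List.mem_cons]
      tauto

-- index correctness: clue x is indexed under e iff some (x, ensemble) pair of ens has e in it
lemma pvMem_index (ens : List (String × List Int)) (e : Int) (x : String) :
    x ∈ (pvIndex ens).getD e [] ↔ ∃ ke ∈ ens, ke.1 = x ∧ e ∈ ke.2 := by
  have aux : ∀ (l : List (String × List Int)) (d : PySem.Dict Int (PySem.Set String)),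
      x ∈ (l.foldl (fun d ke =>
            ke.2.foldl (fun d e' => d.insert e' (PySem.Set.add (d.getD e' []) ke.1)) d) d).getD e []
        ↔ x ∈ d.getD e [] ∨ ∃ ke ∈ l, ke.1 = x ∧ e ∈ ke.2 := by
    intro l
    induction l with
    | nil => intro d; simp
    | cons ke rest ih =>
      intro d
      rw [List.foldl_cons, ih, pvIndexInner]
      simp only [List.mem_cons]
      constructor
      · rintro ((h | ⟨hx, he⟩) | ⟨ke', hke', hx, he⟩)
        · exact Or.inl h
        · exact Or.inr ⟨ke, Or.inl rfl, hx.symm, he⟩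
        · exact Or.inr ⟨ke', Or.inr hke', hx, he⟩
      · rintro (h | ⟨ke', hke' | hke', hx, he⟩)
        · exact Or.inl (Or.inl h)
        · subst hke'
          exact Or.inl (Or.inr ⟨hx.symm, he⟩)
        · exact Or.inr ⟨ke', hke', hx, he⟩
  rw [pvIndex, aux]
  simp [PySem.Dict.getD_empty]

lemma pvMem_hitFold (idx : PySem.Dict Int (PySem.Set String)) : ∀ (el : List Int)
    (s : PySem.Set String) (x : String),
    x ∈ el.foldl (fun s e => PySem.Set.union s (idx.getD e [])) s
      ↔ x ∈ s ∨ ∃ e ∈ el, x ∈ idx.getD e [] := by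
  intro el
  induction el with
  | nil => intro s x; simp
  | cons e el ih =>
    intro s x
    rw [List.foldl_cons, ih]
    simp only [PySem.Set.mem_union, List.mem_cons]
    constructor
    · rintro ((h | h) | ⟨e', he', h⟩)
      · exact Or.inl h
      · exact Or.inr ⟨e, Or.inl rfl, h⟩
      · exact Or.inr ⟨e', Or.inr he', h⟩
    · rintro (h | ⟨e', he' | he', h⟩)
      · exact Or.inl (Or.inl h)
      · exact Or.inl (Or.inr (he' ▸ h))
      · exact Or.inr ⟨e', he', h⟩

lemma pvMem_missFold (idx : PySem.Dict Int (PySem.Set String)) (ac : PySem.Set String) :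
    ∀ (el : List Int) (s : PySem.Set String) (x : String),
    x ∈ el.foldl (fun s e => PySem.Set.union s (PySem.Set.diff ac (idx.getD e []))) s
      ↔ x ∈ s ∨ ∃ e ∈ el, x ∈ ac ∧ x ∉ idx.getD e [] := by
  intro el
  induction el with
  | nil => intro s x; simp
  | cons e el ih =>
    intro s x
    rw [List.foldl_cons, ih]
    simp only [PySem.Set.mem_union, PySem.Set.mem_diff, List.mem_cons]
    constructor
    · rintro ((h | h) | ⟨e', he', h⟩)
      · exact Or.inl h
      · exact Or.inr ⟨e, Or.inl rfl, h⟩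
      · exact Or.inr ⟨e', Or.inr he', h⟩
    · rintro (h | ⟨e', he' | he', h⟩)
      · exact Or.inl (Or.inl h)
      · exact Or.inl (Or.inr (he' ▸ h))
      · exact Or.inr ⟨e', he', h⟩

lemma pvNodup_unionFold {β : Type} (f : β → PySem.Set String) : ∀ (el : List β)
    (s : PySem.Set String), s.Nodup →
    (el.foldl (fun s e => PySem.Set.union s (f e)) s).Nodup := by
  intro el
  induction el with
  | nil => intro s h; exact h
  | cons e el ih =>
    intro s h
    rw [List.foldl_cons]
    exact ih _ (PySem.Set.nodup_union s (f e) h)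

lemma pvHit_nodup (idx : PySem.Dict Int (PySem.Set String)) (el : List Int) :
    (pvHit idx el).Nodup :=
  pvNodup_unionFold (fun e => idx.getD e []) el [] List.nodup_nil

lemma pvMiss_nodup (idx : PySem.Dict Int (PySem.Set String)) (ac : PySem.Set String)
    (el : List Int) : (pvMiss idx ac el).Nodup :=
  pvNodup_unionFold (fun e => PySem.Set.diff ac (idx.getD e [])) el [] List.nodup_nil

-- the A-side clue lists of one color
def pvLA_cube (ens : List (String × List Int)) (el : List Int) : List String :=
  el.flatMap (fun elt => (ens.filter (fun ke => ke.2.contains elt)).map Prod.fst)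

def pvLA_circle (ens : List (String × List Int)) (el : List Int) : List String :=
  el.flatMap (fun elt => (ens.filter (fun ke => !(ke.2.contains elt))).map Prod.fst)

-- A's cube clue list and B's index-union have the same members
lemma pvMem_cube (ens : List (String × List Int)) (el : List Int) (x : String) :
    x ∈ pvLA_cube ens el ↔ x ∈ pvHit (pvIndex ens) el := by
  rw [pvHit, pvMem_hitFold]
  simp only [pvLA_cube, List.mem_flatMap, List.mem_map, List.mem_filter, List.contains_iff_mem,
    PySem.Set.empty, List.not_mem_nil, false_or]
  constructor
  · rintro ⟨e, he, ke, ⟨hke, hmem⟩, hx⟩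
    exact ⟨e, he, (pvMem_index ens e x).mpr ⟨ke, hke, hx, hmem⟩⟩
  · rintro ⟨e, he, hx⟩
    obtain ⟨ke, hke, hx, hmem⟩ := (pvMem_index ens e x).mp hx
    exact ⟨e, he, ke, ⟨hke, hmem⟩, hx⟩

-- A's circle clue list and B's complement-union have the same members (ens keys distinct)
lemma pvMem_circle (ens : List (String × List Int)) (he : (ens.map Prod.fst).Nodup)
    (el : List Int) (x : String) :
    x ∈ pvLA_circle ens el
      ↔ x ∈ pvMiss (pvIndex ens) (PySem.Set.ofList (ens.map Prod.fst)) el := by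
  rw [pvMiss, pvMem_missFold]
  simp only [pvLA_circle, List.mem_flatMap, List.mem_map, List.mem_filter, Bool.not_eq_true',
    ← Bool.not_eq_true, List.contains_iff_mem, PySem.Set.mem_ofList, PySem.Set.empty, List.not_mem_nil, false_or]
  constructor
  · rintro ⟨e, hel, ke, ⟨hke, hmem⟩, hx⟩
    refine ⟨e, hel, ⟨ke, hke, hx⟩, ?_⟩
    intro hidx
    obtain ⟨ke', hke', hx', hmem'⟩ := (pvMem_index ens e x).mp hidx
    have : ke' = ke := List.inj_on_of_nodup_map he hke' hke (by rw [hx', hx])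
    exact hmem (this ▸ hmem')
  · rintro ⟨e, hel, ⟨ke, hke, hx⟩, hnot⟩
    refine ⟨e, hel, ke, ⟨hke, ?_⟩, hx⟩
    intro hmem
    exact hnot ((pvMem_index ens e x).mpr ⟨ke, hke, hx, hmem⟩)

lemma pvLA_cube_nil_iff (ens : List (String × List Int)) (el : List Int) :
    pvLA_cube ens el = [] ↔ pvHit (pvIndex ens) el = [] := by
  rw [List.eq_nil_iff_forall_not_mem, List.eq_nil_iff_forall_not_mem]
  constructor
  · exact fun H x hx => H x ((pvMem_cube ens el x).mpr hx)
  · exact fun H x hx => H x ((pvMem_cube ens el x).mp hx)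

lemma pvLA_circle_nil_iff (ens : List (String × List Int)) (he : (ens.map Prod.fst).Nodup)
    (el : List Int) :
    pvLA_circle ens el = []
      ↔ pvMiss (pvIndex ens) (PySem.Set.ofList (ens.map Prod.fst)) el = [] := by
  rw [List.eq_nil_iff_forall_not_mem, List.eq_nil_iff_forall_not_mem]
  constructor
  · exact fun H x hx => H x ((pvMem_circle ens he el x).mpr hx)
  · exact fun H x hx => H x ((pvMem_circle ens he el x).mp hx)

lemma pvSort_LA_cube (ens : List (String × List Int)) (el : List Int) :
    pvSortS (PySem.Set.ofList (pvLA_cube ens el)) = pvSortS (pvHit (pvIndex ens) el) := by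
  apply pvSortS_eq
  · exact PySem.Set.nodup_ofList _
  · exact pvHit_nodup _ el
  · intro a
    rw [PySem.Set.mem_ofList]
    exact pvMem_cube ens el a

lemma pvSort_LA_circle (ens : List (String × List Int)) (he : (ens.map Prod.fst).Nodup)
    (el : List Int) :
    pvSortS (PySem.Set.ofList (pvLA_circle ens el))
      = pvSortS (pvMiss (pvIndex ens) (PySem.Set.ofList (ens.map Prod.fst)) el) := by
  apply pvSortS_eq
  · exact PySem.Set.nodup_ofList _
  · exact pvMiss_nodup _ _ el
  · intro a
    rw [PySem.Set.mem_ofList]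
    exact pvMem_circle ens he el a

lemma pvPassA_cons (cond : Int → List Int → Bool) (ens : List (String × List Int))
    (d : PySem.Dict String (List String)) (ce : String × List Int)
    (percol : List (String × List Int)) :
    pvPassA cond ens d (ce :: percol)
      = pvPassA cond ens (ce.2.foldl (fun d elt =>
          ens.foldl (fun d ke => if cond elt ke.2 then pvAddClue d ce.1 ke.1 else d) d) d)
          percol := rfl

lemma pvPass_cube (ens : List (String × List Int)) : ∀ (cube : List (String × List Int))
    (dA dB : PySem.Dict String (List String)), pvInv dA dB →
    (∀ ce ∈ cube, dB.get? ce.1 = none) → (cube.map Prod.fst).Nodup →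
    pvInv (pvPassA (fun elt ensemble => ensemble.contains elt) ens dA cube)
      (cube.foldl (fun out ce =>
        let s := pvHit (pvIndex ens) ce.2
        if s ≠ [] then out.insert ce.1 s else out) dB) := by
  intro cube
  induction cube with
  | nil => intro dA dB h _ _; exact h
  | cons ce cube ih =>
    intro dA dB hInv hfresh hnd
    have hBnone : dB.get? ce.1 = none := hfresh ce (by simp)
    have hAnone : dA.get? ce.1 = none := by rw [pvInv_get? hInv, hBnone]; rfl
    have hkA : dA.keys.Nodup := pvInv_keysA hInv
    have hne_tail : ∀ ce' ∈ cube, ce'.1 ≠ ce.1 := by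
      intro ce' hce' heq
      exact (List.nodup_cons.mp hnd).1 (heq ▸ List.mem_map_of_mem hce')
    rw [pvPassA_cons, List.foldl_cons,
      pvPassA_inner (fun elt ensemble => ensemble.contains elt) ens ce.1 ce.2 dA]
    have hLA : (ce.2.flatMap (fun elt =>
        (ens.filter (fun ke => ke.2.contains elt)).map Prod.fst)) = pvLA_cube ens ce.2 := rfl
    rw [hLA, pvFoldAdd_none ce.1 _ dA hkA hAnone]
    show pvInv _ (cube.foldl _
      (if pvHit (pvIndex ens) ce.2 ≠ [] then dB.insert ce.1 (pvHit (pvIndex ens) ce.2) else dB))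
    by_cases hs : pvHit (pvIndex ens) ce.2 = []
    · rw [if_pos ((pvLA_cube_nil_iff ens ce.2).mpr hs), if_neg (by simpa using hs)]
      exact ih dA dB hInv (fun ce' h' => hfresh ce' (List.mem_cons_of_mem _ h'))
        (List.nodup_cons.mp hnd).2
    · rw [if_neg ((fun h => hs ((pvLA_cube_nil_iff ens ce.2).mp h))),
        if_pos (by simpa using hs)]
      have hBc : dB.contains ce.1 = false := by
        rw [PySem.Dict.contains_eq_isSome_get?, hBnone]; rfl
      have hAc : dA.contains ce.1 = false := by
        rw [PySem.Dict.contains_eq_isSome_get?, hAnone]; rfl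
      obtain ⟨hknd, hvals, hitems⟩ := hInv
      have hInv' : pvInv (dA.insert ce.1 (pvSortS (PySem.Set.ofList (pvLA_cube ens ce.2))))
          (dB.insert ce.1 (pvHit (pvIndex ens) ce.2)) := by
        refine ⟨PySem.Dict.nodup_keys_insert dB ce.1 _ hknd, ?_, ?_⟩
        · intro p hp
          rw [PySem.Dict.items_insert_of_not_contains dB _ hBc, List.mem_append] at hp
          rcases hp with hp | hp
          · exact hvals p hp
          · rw [List.mem_singleton] at hp
            rw [hp]
            exact pvHit_nodup _ ce.2
        · rw [PySem.Dict.items_insert_of_not_contains dA _ hAc,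
            PySem.Dict.items_insert_of_not_contains dB _ hBc, hitems]
          unfold pvMapSort
          rw [List.map_append]
          simp only [List.map_cons, List.map_nil]
          rw [pvSort_LA_cube]
      refine ih _ _ hInv' ?_ (List.nodup_cons.mp hnd).2
      intro ce' hce'
      rw [PySem.Dict.get?_insert_of_ne dB _ (hne_tail ce' hce')]
      exact hfresh ce' (List.mem_cons_of_mem _ hce')

lemma pvPass_circle (ens : List (String × List Int)) (he : (ens.map Prod.fst).Nodup) :
    ∀ (circle : List (String × List Int))
    (dA dB : PySem.Dict String (List String)), pvInv dA dB →
    pvInv (pvPassA (fun elt ensemble => !(ensemble.contains elt)) ens dA circle)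
      (circle.foldl (fun out ce =>
        let s := pvMiss (pvIndex ens) (PySem.Set.ofList (ens.map Prod.fst)) ce.2
        if s ≠ [] then out.insert ce.1 (PySem.Set.union (out.getD ce.1 []) s) else out) dB) := by
  intro circle
  induction circle with
  | nil => intro dA dB h; exact h
  | cons ce circle ih =>
    intro dA dB hInv
    have hkA := pvInv_keysA hInv
    rw [pvPassA_cons, List.foldl_cons,
      pvPassA_inner (fun elt ensemble => !(ensemble.contains elt)) ens ce.1 ce.2 dA]
    have hLA : (ce.2.flatMap (fun elt =>
        (ens.filter (fun ke => !(ke.2.contains elt))).map Prod.fst)) = pvLA_circle ens ce.2 := rfl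
    rw [hLA]
    simp only []
    cases hB : dB.get? ce.1 with
    | none =>
      have hAnone : dA.get? ce.1 = none := by rw [pvInv_get? hInv, hB]; rfl
      have hgD : dB.getD ce.1 [] = [] := by rw [PySem.Dict.getD_eq_get?_getD, hB]; rfl
      rw [pvFoldAdd_none ce.1 _ dA hkA hAnone]
      by_cases hs : pvMiss (pvIndex ens) (PySem.Set.ofList (ens.map Prod.fst)) ce.2 = []
      · rw [if_pos ((pvLA_circle_nil_iff ens he ce.2).mpr hs), if_neg (by simpa using hs)]
        exact ih dA dB hInv
      · rw [if_neg (fun h => hs ((pvLA_circle_nil_iff ens he ce.2).mp h)),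
          if_pos (by simpa using hs)]
        have hBc : dB.contains ce.1 = false := by
          rw [PySem.Dict.contains_eq_isSome_get?, hB]; rfl
        have hAc : dA.contains ce.1 = false := by
          rw [PySem.Dict.contains_eq_isSome_get?, hAnone]; rfl
        -- '[] | miss' is miss again: the union from the empty set of a Nodup set is itself
        have hunion : PySem.Set.union (dB.getD ce.1 [])
            (pvMiss (pvIndex ens) (PySem.Set.ofList (ens.map Prod.fst)) ce.2)
            = pvMiss (pvIndex ens) (PySem.Set.ofList (ens.map Prod.fst)) ce.2 := by
          rw [hgD]
          have h1 : PySem.Set.union ([] : PySem.Set String)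
              (pvMiss (pvIndex ens) (PySem.Set.ofList (ens.map Prod.fst)) ce.2)
              = PySem.Set.ofList (pvMiss (pvIndex ens) (PySem.Set.ofList (ens.map Prod.fst)) ce.2) := rfl
          rw [h1, PySem.Set.ofList_eq_self_of_nodup _ (pvMiss_nodup _ _ ce.2)]
        rw [hunion]
        obtain ⟨hknd, hvals, hitems⟩ := hInv
        have hInv' : pvInv (dA.insert ce.1 (pvSortS (PySem.Set.ofList (pvLA_circle ens ce.2))))
            (dB.insert ce.1 (pvMiss (pvIndex ens) (PySem.Set.ofList (ens.map Prod.fst)) ce.2)) := by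
          refine ⟨PySem.Dict.nodup_keys_insert dB ce.1 _ hknd, ?_, ?_⟩
          · intro p hp
            rw [PySem.Dict.items_insert_of_not_contains dB _ hBc, List.mem_append] at hp
            rcases hp with hp | hp
            · exact hvals p hp
            · rw [List.mem_singleton] at hp
              rw [hp]
              exact pvMiss_nodup _ _ ce.2
          · rw [PySem.Dict.items_insert_of_not_contains dA _ hAc,
              PySem.Dict.items_insert_of_not_contains dB _ hBc, hitems]
            unfold pvMapSort
            rw [List.map_append]
            simp only [List.map_cons, List.map_nil]
            rw [pvSort_LA_circle ens he]
        exact ih _ _ hInv'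
    | some t =>
      have htmem : (ce.1, t) ∈ dB.items := PySem.Dict.mem_items_of_get?_eq_some dB hB
      have htnd : t.Nodup := hInv.2.1 (ce.1, t) htmem
      have hA : dA.get? ce.1 = some (pvSortS t) := by rw [pvInv_get? hInv, hB]; rfl
      have hgD : dB.getD ce.1 [] = t := by
        rw [PySem.Dict.getD_eq_get?_getD, hB]; rfl
      rw [pvFoldAdd_some ce.1 (pvLA_circle ens ce.2) dA (pvSortS t) hkA hA (pvSorted_lt t htnd)]
      by_cases hs : pvMiss (pvIndex ens) (PySem.Set.ofList (ens.map Prod.fst)) ce.2 = []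
      · have hLAnil : pvLA_circle ens ce.2 = [] := (pvLA_circle_nil_iff ens he ce.2).mpr hs
        rw [hLAnil, if_neg (by simpa using hs)]
        have h1 : PySem.Set.update (pvSortS t) ([] : List String) = pvSortS t := rfl
        rw [h1]
        have h2 : pvSortS (pvSortS t) = pvSortS t := by
          unfold pvSortS
          exact PySem.List.sorted_sorted t (fun x => x)
        rw [h2, pvInsert_self dA ce.1 (pvSortS t) hkA hA]
        exact ih dA dB hInv
      · rw [if_pos (by simpa using hs)]
        have hBc : dB.contains ce.1 = true := by
          rw [PySem.Dict.contains_eq_isSome_get?, hB]; rfl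
        have hAc : dA.contains ce.1 = true := by
          rw [PySem.Dict.contains_eq_isSome_get?, hA]; rfl
        rw [hgD]
        have hval : pvSortS (PySem.Set.update (pvSortS t) (pvLA_circle ens ce.2))
            = pvSortS (PySem.Set.union t
                (pvMiss (pvIndex ens) (PySem.Set.ofList (ens.map Prod.fst)) ce.2)) := by
          apply pvSortS_eq
          · exact PySem.Set.nodup_update _ _
              ((List.Perm.nodup_iff (PySem.List.sorted_perm t (fun x => x) false)).mpr htnd)
          · exact PySem.Set.nodup_union t _ htnd
          · intro a
            rw [PySem.Set.mem_update, PySem.Set.mem_union]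
            unfold pvSortS
            rw [PySem.List.mem_sorted]
            exact or_congr Iff.rfl (pvMem_circle ens he ce.2 a)
        obtain ⟨hknd, hvals, hitems⟩ := hInv
        have hInv' : pvInv
            (dA.insert ce.1 (pvSortS (PySem.Set.update (pvSortS t) (pvLA_circle ens ce.2))))
            (dB.insert ce.1 (PySem.Set.union t
              (pvMiss (pvIndex ens) (PySem.Set.ofList (ens.map Prod.fst)) ce.2))) := by
          refine ⟨PySem.Dict.nodup_keys_insert dB ce.1 _ hknd, ?_, ?_⟩
          · intro p hp
            rw [PySem.Dict.items_insert_of_contains dB _ hBc] at hp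
            obtain ⟨q, hq, hpq⟩ := List.mem_map.mp hp
            by_cases hqk : (q.1 == ce.1) = true
            · rw [if_pos hqk] at hpq
              rw [← hpq]
              exact PySem.Set.nodup_union t _ htnd
            · rw [if_neg hqk] at hpq
              rw [← hpq]
              exact hvals q hq
          · rw [PySem.Dict.items_insert_of_contains dA _ hAc,
              PySem.Dict.items_insert_of_contains dB _ hBc, hitems]
            unfold pvMapSort
            rw [List.map_map, List.map_map]
            apply List.map_congr_left
            intro p hp
            simp only [Function.comp]
            by_cases hpk : (p.1 == ce.1) = true
            · rw [if_pos hpk, if_pos hpk, hval]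
            · rw [if_neg hpk, if_neg hpk]
        exact ih _ _ hInv'

-- ===== VERDICT (by name: the statement is the Claim_ definition above) =====
theorem impossible_clues_spec : Claim_equal_impossible_clues := by
  intro cube circle ens _hDom hPre
  unfold Spec_impossible_clues
  obtain ⟨hc, _hr, hens⟩ := hPre
  have h0 : pvInv PySem.Dict.empty PySem.Dict.empty := by
    refine ⟨by simp [PySem.Dict.empty], by simp [PySem.Dict.empty], rfl⟩
  have h1 := pvPass_cube ens cube PySem.Dict.empty PySem.Dict.empty h0
    (fun ce _ => PySem.Dict.get?_empty ce.1) hc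
  have h2 := pvPass_circle ens hens circle _ _ h1
  show impossible_clues cube circle ens = impossible_clues_alt cube circle ens
  unfold impossible_clues impossible_clues_alt
  exact h2.2.2
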